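/- GENERATED by tools/from_farm_form.py from prooffarm-gif/accepted/digest_map.1/Proof.lean (a worked proof of the farm's unit `digest_map.1`,
   accepted by the verdict) — do not edit. -/
import Gif.Spec.Units.digest_map_1
import Gif.Spec.AllSegs

open X86 X86.User Asan ProgX.Base ProgX.Base.Spec Gif.Spec

set_option maxRecDepth 4000
set_option maxHeartbeats 4000000

/-
  UNIT digest_map.1: segment 1 of `digest_map` (105480H … 1054F5H; gif_driver.c:113-121), from the function's ENTRY to the head of the
  colour loop (105553H) or to the shared exit (105558H). The memory changes only in the function's 64 bytes of stack; the digest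
  value (`rbx`, `rbp`) is never constrained.

      seg1_at_init   PURE: `digest_map.At` FOR THE FIRST TIME (the segment starts at the entry: there is no `At` to carry yet)
      seg1_map_now   PURE: the map's fields in the present memory, from the pre and `At.same`
      seg1_null      `map == NULL`: the pushes, `digest_int(h, −1)` (1054EBH), `rbp = rax`, to the exit: `Done`
      seg1_pushes    `map ≠ NULL`: the pushes, `r13 = rdi = map`, to the first check (105496H): `seg1_Mid chk1`
      seg1_count     105496H … 1054AAH: the checked load of `ColorCount` (kept in `r14d`), `digest_int`: `seg1_Mid2 ret2`
      seg1_bits      1054AAH … 1054C2H: the checked load of `BitsPerPixel`, `digest_int`: `seg1_Mid2 ret4`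
      seg1_sort      1054C2H … 105553H: the checked load of `SortFlag`, `digest_int`, `rbp = h`, `r12d = 0`: `Head mp.count`
  ONE LEMMA PER RETURNED CALLEE STATE; the theorem chains them with `ReachVia.trans`. `digest_int`'s post is `True`: behind it the
  memory is known through its footprint only (16 bytes of stack below its return address): `At` is carried by
  `digest_map.At.carry` (Gif/Spec/DriverCarry.lean) over the window `[RA − 64, RA − 40)`.
-/
namespace Gif.Spec.digest_map_1

/-- **`digest_map.At` FOR THE FIRST TIME**, at a state `s` of the function behind its five pushes: `rsp = RA − 40`, `r15` the entry's,
the five saved registers in their slots, no shadow byte written, nothing written but the contract's 64 bytes of stack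
`[RA − 64, RA)`. The return address is read through that footprint (its slot `[RA, RA + 8)` lies above it); the heap's invariant
is the pre's with the clean stack lowered to `RA − 40` (`HeapInv.lower`) and carried over the stack window (`HeapInv.sameExcept`).
Pure: no machine walk. What `digest_map.At.carry` is for a later state, this is for the first one. -/
theorem seg1_at_init {cut : Word} {H : Heap} {rest : List Obj} {frames : List (Nat × FrameLayout)} {m : Option Map}
    {u₀ e : State} {ret : Word} {s : State}
    (he : AtEntry (conv u₀) Gif.L.digest_map.entry (digest_map.spec H rest frames m).frame ret e)
    (hpre : (digest_map.spec H rest frames m).pre e)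
    (hrip : s.rip = cut) (hrsp : s.reg .rsp = e.reg .rsp - 40) (hr15 : s.reg .r15 = e.reg .r15)
    (k_r14 : s.mem.readLE (e.reg .rsp - 8) 8 = (e.reg .r14).toNat)
    (k_r13 : s.mem.readLE (e.reg .rsp - 16) 8 = (e.reg .r13).toNat)
    (k_r12 : s.mem.readLE (e.reg .rsp - 24) 8 = (e.reg .r12).toNat)
    (k_rbp : s.mem.readLE (e.reg .rsp - 32) 8 = (e.reg .rbp).toNat)
    (k_rbx : s.mem.readLE (e.reg .rsp - 40) 8 = (e.reg .rbx).toNat)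
    (hcode : (conv u₀).code.In s.mem) (habi : (conv u₀).inv s)
    (hun : ShadowUntouched e.mem s.mem)
    (hsame : Mem.SameExcept [⟨(e.reg .rsp).toNat - 64, (e.reg .rsp).toNat⟩] e.mem s.mem) :
    digest_map.At cut H rest frames m u₀ e ret s := by
  have he_room := he.room
  have he_top := he.top
  have he_align := he.align
  simp only [vspec, ProgX.conv_stackLo, ProgX.conv_stackHi] at he_room he_top
  have hbase := hpre.1.base
  have hra : s.mem.readLE (e.reg .rsp) 8 = e.mem.readLE (e.reg .rsp) 8 := by
    apply hsame.readLE _ 8 (by omega)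
    intro w hw
    have hw_eq := List.mem_singleton.mp hw
    rw [hw_eq]
    simp only
    omega
  exact {
    entry := he
    pre := hpre
    rip := hrip
    rsp := hrsp
    r15 := hr15
    slot_r14 := k_r14
    slot_r13 := k_r13
    slot_r12 := k_r12
    slot_rbp := k_rbp
    slot_rbx := k_rbx
    slot_ra := by
      rw [hra]
      exact he.retAddr
    inv := by
      have hlow : HeapInv H rest frames ((e.reg .rsp).toNat - 40) e.mem :=
        hpre.1.inv.lower (by omega) (by omega) (by omega)
      refine hlow.sameExcept hun hsame ?_
      intro w hw
      have hw_eq := List.mem_singleton.mp hw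
      rw [hw_eq, hbase]
      left
      left
      simp only
      omega
    un := hun
    same := hsame
    code := hcode
    abi := habi
  }


/-- **IN FRONT OF THE FIRST CHECK** (105496H, gif_driver.c:118) on the path `map ≠ NULL`: `At`, and `r13 = rdi = map = mp.obj`
(`rdi` is the argument of the check routine). -/
def seg1_Mid (cut : Word) (H : Heap) (rest : List Obj) (frames : List (Nat × FrameLayout)) (mp : Map) (u₀ e : State)
    (ret : Word) (v : State) : Prop :=
  digest_map.At cut H rest frames (some mp) u₀ e ret v ∧ v.reg .r13 = UInt64.ofNat mp.obj ∧
    v.reg .rdi = UInt64.ofNat mp.obj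

/-- **The map's fields in the present memory**: `MapAt` holds at the entry (the pre) and the function has written only its stack
(`At.same`), which lies below the heap's region where the map object is (`Owns.map_inside`). -/
theorem seg1_map_now {cut : Word} {H : Heap} {rest : List Obj} {frames : List (Nat × FrameLayout)} {mp : Map}
    {u₀ e : State} {ret : Word} {v : State}
    (hat : digest_map.At cut H rest frames (some mp) u₀ e ret v) : MapAt (some mp) mp.obj v.mem := by
  have he_top := hat.entry.top
  simp only [vspec, ProgX.conv_stackHi] at he_top
  obtain ⟨hp, hmap, howns⟩ := hat.pre
  obtain ⟨hobj1, hobj2, -, -⟩ := howns.map_inside hp.inv.heap hp.base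
  have hptr : (e.reg .rsi).toNat = mp.obj := hmap.1
  rw [hptr] at hmap
  refine hmap.sameExcept hat.same (by omega) ?_
  intro w hw
  have hw_eq := List.mem_singleton.mp hw
  rw [hw_eq]
  right
  show (e.reg .rsp).toNat ≤ mp.obj
  omega

/-- **BEHIND A `digest_int` OF THE PATH `map ≠ NULL`** (1054AAH, 1054C2H): `At`, `r13 = map = mp.obj`, and `r14 = ColorCount = mp.count`
(loaded once at 10549BH, zero-extended): what the loop head needs. `rax` (the hash) is free. -/
def seg1_Mid2 (cut : Word) (H : Heap) (rest : List Obj) (frames : List (Nat × FrameLayout)) (mp : Map) (u₀ e : State)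
    (ret : Word) (v : State) : Prop :=
  digest_map.At cut H rest frames (some mp) u₀ e ret v ∧ v.reg .r13 = UInt64.ofNat mp.obj ∧
    (v.reg .r14).toNat = mp.count

/-- **THE PATH `map == NULL`** (`m = none`: `MapAt none` says `rsi = 0`; gif_driver.c:115-116): the five pushes, `rbx = h`, `je` taken,
`digest_int(h, −1)` (1054EBH), `rbp = rax`, to the shared exit: `Done`. `At` is made behind the call (`seg1_at_init`): the five
slots are read in the memory of the call's entry (`u_read`) and carried through digest_int's footprint (`u_frame`). -/
theorem seg1_null {Lay : Layout} (hLay : Lay.hi = 0x1000000) {μ : Microarch} (hμ : UserX.MicroOK μ) {u₀ : State}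
    (hcode : HasCodeNat Lay u₀ Gif.L.digest_map.entry Gif.Code.code_digest_map.nat Gif.L.digest_map.size)
    (h_int : Calls Lay μ ProgX.Base.WayInv (ProgX.Base.conv u₀) Gif.L.digest_int.entry Gif.Spec.digest_int.spec)
    (H : Heap) (rest : List Obj) (frames : List (Nat × FrameLayout)) (e : State) (ret : Word)
    (he : AtEntry (conv u₀) Gif.L.digest_map.entry (digest_map.spec H rest frames none).frame ret e)
    (hpre : (digest_map.spec H rest frames none).pre e) :
    ReachVia Lay μ WayInv e (fun w =>
      (∃ k : Nat, digest_map.Head k H rest frames none u₀ e ret w) ∨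
      digest_map.Done H rest frames none u₀ e ret w) := by
  have he0 := he
  have hpre0 := hpre
  v_entry he
  obtain ⟨hp, hmap, howns⟩ := hpre
  have hnull : (e.reg .rsi).toNat = 0 := hmap
  u_walk hcode [hμ.vendor] until [Gif.L.digest_map.at_105553, Gif.L.digest_map.at_105558]
    span [ProgX.Base.L.textLo, ProgX.Base.L.textHi] side (v_side)
  case call_inv =>
    v_inv
  case pre_1054eb =>
    trivial
  v_after_call w_rsp_1054eb w_mem_1054eb
  -- the five saved registers, through digest_int's footprint
  have p_r14 : s_1054eb.mem.readLE (e.reg .rsp - 8) 8 = (e.reg .r14).toNat := by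
    rw [w_mem_1054eb]
    u_read
  rw [w_mem_1054eb] at p_r14
  have k_r14 : s_1054ebr.mem.readLE (e.reg .rsp - 8) 8 = (e.reg .r14).toNat := by u_frame p_r14
  have p_r13 : s_1054eb.mem.readLE (e.reg .rsp - 16) 8 = (e.reg .r13).toNat := by
    rw [w_mem_1054eb]
    u_read
  rw [w_mem_1054eb] at p_r13
  have k_r13 : s_1054ebr.mem.readLE (e.reg .rsp - 16) 8 = (e.reg .r13).toNat := by u_frame p_r13
  have p_r12 : s_1054eb.mem.readLE (e.reg .rsp - 24) 8 = (e.reg .r12).toNat := by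
    rw [w_mem_1054eb]
    u_read
  rw [w_mem_1054eb] at p_r12
  have k_r12 : s_1054ebr.mem.readLE (e.reg .rsp - 24) 8 = (e.reg .r12).toNat := by u_frame p_r12
  have p_rbp : s_1054eb.mem.readLE (e.reg .rsp - 32) 8 = (e.reg .rbp).toNat := by
    rw [w_mem_1054eb]
    u_read
  rw [w_mem_1054eb] at p_rbp
  have k_rbp : s_1054ebr.mem.readLE (e.reg .rsp - 32) 8 = (e.reg .rbp).toNat := by u_frame p_rbp
  have p_rbx : s_1054eb.mem.readLE (e.reg .rsp - 40) 8 = (e.reg .rbx).toNat := by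
    rw [w_mem_1054eb]
    u_read
  rw [w_mem_1054eb] at p_rbx
  have k_rbx : s_1054ebr.mem.readLE (e.reg .rsp - 40) 8 = (e.reg .rbx).toNat := by u_frame p_rbx
  have hsame : Mem.SameExcept [⟨(e.reg .rsp).toNat - 64, (e.reg .rsp).toNat⟩] e.mem s_1054ebr.mem := by u_same
  have hun : ShadowUntouched e.mem s_1054ebr.mem := by v_untouched
  have hat : digest_map.At Gif.L.digest_map.ret7 H rest frames none u₀ e ret s_1054ebr :=
    seg1_at_init he0 hpre0 w_rip w_rsp (w_kept.get .r15 rfl) k_r14 k_r13 k_r12 k_rbp k_rbx w_code w_inv hun hsame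
  clear w_same w_post p_r14 p_r13 p_r12 p_rbp p_rbx
  u_walk hcode [hμ.vendor] until [Gif.L.digest_map.at_105553, Gif.L.digest_map.at_105558]
    span [ProgX.Base.L.textLo, ProgX.Base.L.textHi] side (v_side)
  -- 0x1054f3 → 0x105558 (gif_driver.c:127): THE EXIT, `Done`; nothing stored since `ret7`
  have hun2 : ShadowUntouched s_1054ebr.mem s_1054f3.mem := by
    rw [w_mem]
    exact Mem.EqOn.refl _ _ _
  have hsame2 : Mem.SameExcept [⟨(e.reg .rsp).toNat - 64, (e.reg .rsp).toNat - 40⟩] s_1054ebr.mem s_1054f3.mem := by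
    rw [w_mem]
    exact Mem.SameExcept.refl _ _
  have habi : (conv u₀).inv s_1054f3 := by v_inv
  have hr15 : s_1054f3.reg .r15 = s_1054ebr.reg .r15 := (w_kept.get .r15 rfl).trans hat.r15.symm
  have hat' := hat.carry (cut' := Gif.L.digest_map.at_105558) w_rip w_rsp hr15
    (ProgX.Base.conv_code_in w_eq) habi hun2 hsame2
  exact ReachVia.done (Or.inr ⟨hat'⟩)

/-- **THE PATH `map ≠ NULL`, TO THE FIRST CHECK** (`m = some mp`: `rsi = mp.obj`, a heap address, not 0; 105480H … 105496H;
gif_driver.c:113-118): the five pushes, `rbx = h`, `je` not taken (the NULL arm is pruned by the walker), `r13 = rdi = map`.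
`At` is made here (`seg1_at_init`): the memory is five stores over the entry's. -/
theorem seg1_pushes {Lay : Layout} (hLay : Lay.hi = 0x1000000) {μ : Microarch} (hμ : UserX.MicroOK μ) {u₀ : State}
    (hcode : HasCodeNat Lay u₀ Gif.L.digest_map.entry Gif.Code.code_digest_map.nat Gif.L.digest_map.size)
    (H : Heap) (rest : List Obj) (frames : List (Nat × FrameLayout)) (mp : Map) (e : State) (ret : Word)
    (he : AtEntry (conv u₀) Gif.L.digest_map.entry (digest_map.spec H rest frames (some mp)).frame ret e)
    (hpre : (digest_map.spec H rest frames (some mp)).pre e) :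
    ReachVia Lay μ WayInv e (seg1_Mid Gif.L.digest_map.chk1 H rest frames mp u₀ e ret) := by
  have he0 := he
  have hpre0 := hpre
  v_entry he
  obtain ⟨hp, hmap, howns⟩ := hpre
  have hbase := hp.base
  obtain ⟨hobj1, hobj2, hcol1, hcol2⟩ := howns.map_inside hp.inv.heap hbase
  have c_rsi : e.reg .rsi = UInt64.ofNat mp.obj := Word.eq_ofNat_of_toNat hmap.1
  u_walk hcode [hμ.vendor] until [Gif.L.digest_map.chk1, Gif.L.digest_map.at_105558]
    span [ProgX.Base.L.textLo, ProgX.Base.L.textHi] side (v_side)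
  clear he_align
  -- 0x105496 (gif_driver.c:118): in front of the first check; the five saved registers are in their slots
  have k_r14 : s_105493.mem.readLE (e.reg .rsp - 8) 8 = (e.reg .r14).toNat := by
    rw [w_mem]
    u_read
  have k_r13 : s_105493.mem.readLE (e.reg .rsp - 16) 8 = (e.reg .r13).toNat := by
    rw [w_mem]
    u_read
  have k_r12 : s_105493.mem.readLE (e.reg .rsp - 24) 8 = (e.reg .r12).toNat := by
    rw [w_mem]
    u_read
  have k_rbp : s_105493.mem.readLE (e.reg .rsp - 32) 8 = (e.reg .rbp).toNat := by
    rw [w_mem]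
    u_read
  have k_rbx : s_105493.mem.readLE (e.reg .rsp - 40) 8 = (e.reg .rbx).toNat := by
    rw [w_mem]
    u_read
  have hsame : Mem.SameExcept [⟨(e.reg .rsp).toNat - 64, (e.reg .rsp).toNat⟩] e.mem s_105493.mem := by
    rw [w_mem]
    u_same
  have hun : ShadowUntouched e.mem s_105493.mem := by v_untouched
  have habi : (conv u₀).inv s_105493 := by
    have x_df : s_105493.flags .df = false := by
      rw [w_flags, X86.User.df_setStatus]
      exact he_df
    have x_mx : s_105493.mxcsr &&& 0x1F80 = 0x1F80 := by
      rw [w_mxcsr]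
      exact he_mx
    exact ProgX.Base.abiInv_of x_df x_mx
  have hat : digest_map.At Gif.L.digest_map.chk1 H rest frames (some mp) u₀ e ret s_105493 :=
    seg1_at_init he0 hpre0 w_rip w_rsp (w_kept.get .r15 rfl) k_r14 k_r13 k_r12 k_rbp k_rbx
      (ProgX.Base.conv_code_in w_eq) habi hun hsame
  exact ReachVia.done ⟨hat, w_r13, w_rdi⟩

/-- **105496H … 1054AAH** (gif_driver.c:118): the check of `map->ColorCount` (4 bytes at `map + 0`, inside the live map object
`(mp.obj, 24)`), the load into `r14d` (the value is `mp.count` by `MapAt`), `digest_int(h, ColorCount)`. Behind the call: `At` by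
`digest_map.At.carry` over digest_int's footprint and the return-address slots. -/
theorem seg1_count {Lay : Layout} (hLay : Lay.hi = 0x1000000) {μ : Microarch} (hμ : UserX.MicroOK μ) {u₀ : State}
    (hcode : HasCodeNat Lay u₀ Gif.L.digest_map.entry Gif.Code.code_digest_map.nat Gif.L.digest_map.size)
    (h_int : Calls Lay μ ProgX.Base.WayInv (ProgX.Base.conv u₀) Gif.L.digest_int.entry Gif.Spec.digest_int.spec)
    (h_load4 : Asan.SmallCheck Lay μ ProgX.Base.WayInv (ProgX.Base.CodeOK u₀) [.rax, .rcx, .rdx] 4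
      ProgX.Base.L.__asan_load4_noabort.entry)
    (H : Heap) (rest : List Obj) (frames : List (Nat × FrameLayout)) (mp : Map) (e : State) (ret : Word) (v : State)
    (hmid : seg1_Mid Gif.L.digest_map.chk1 H rest frames mp u₀ e ret v) :
    ReachVia Lay μ WayInv v (seg1_Mid2 Gif.L.digest_map.ret2 H rest frames mp u₀ e ret) := by
  obtain ⟨hat, c_r13, c_rdi⟩ := hmid
  have he := hat.entry
  v_entry he
  obtain ⟨hp, -, howns⟩ := hat.pre
  have hbase := hp.base
  obtain ⟨hobj1, hobj2, hcol1, hcol2⟩ := howns.map_inside hat.inv.heap hbase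
  have hlo : LiveIn (H.liveObjs ++ rest) frames mp.obj 24 := howns.map_obj_liveIn rest frames
  obtain ⟨-, hcount, -, hcnt1, hcnt256⟩ := seg1_map_now hat
  have w_rip := hat.rip
  have c_rsp : v.reg .rsp = e.reg .rsp - 40 := hat.rsp
  have w_eq : Mem.EqOn ProgX.Base.L.textLo ProgX.Base.L.textHi u₀.mem v.mem := ProgX.Base.conv_code_eqOn hat.code
  have hdf : v.flags .df = false := (show abiInv _ from hat.abi).1
  have hmx : v.mxcsr &&& 0x1F80 = 0x1F80 := (show abiInv _ from hat.abi).2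
  have hsse := ProgX.Base.sseOK_of_abiInv hat.abi
  have w_kept : RegsKept [.rsp] v v := RegsKept.refl _ _
  simp only [gfield] at hcount
  have l_count : v.mem.readLE (UInt64.ofNat mp.obj) 4 = mp.count := by
    rw [rd_eq_readLE v.mem _ (mp.obj + 0) 4 (by u_omega)]
    exact hcount
  u_walk hcode [hμ.vendor] until [Gif.L.digest_map.at_105553, Gif.L.digest_map.at_105558]
    span [ProgX.Base.L.textLo, ProgX.Base.L.textHi] side (v_side)
  case check_105496 =>
    -- 0x105496, gif_driver.c:118: the check of the load `map->ColorCount`: inside the map object `(mp.obj, 24)`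
    have hun : ShadowUntouched v.mem s_105496.mem := by v_untouched
    exact hlo.accSmall hat.inv.shadow hun _ 4 (by decide) (by u_omega) (by u_omega)
  case call_inv =>
    have x_df : s_1054a5.flags .df = false := by
      rw [w_flags]
      exact w_df_105496
    have x_mx : s_1054a5.mxcsr &&& 0x1F80 = 0x1F80 := by
      rw [w_mxcsr]
      exact hmx
    exact ProgX.Base.abiInv_of x_df x_mx
  case pre_1054a5 =>
    trivial
  -- 0x1054aa: digest_int has returned
  v_after_call w_rsp_1054a5 w_mem_1054a5
  have hsame : Mem.SameExcept [⟨(e.reg .rsp).toNat - 64, (e.reg .rsp).toNat - 40⟩] v.mem s_1054a5r.mem := by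
    u_same
  have hun : ShadowUntouched v.mem s_1054a5r.mem := by v_untouched
  have hat' := hat.carry (cut' := Gif.L.digest_map.ret2) w_rip w_rsp (w_kept.get .r15 rfl) w_code w_inv hun hsame
  refine ReachVia.done ⟨hat', ?_, ?_⟩
  · rw [w_kept.get .r13 rfl]
    exact c_r13
  · rw [w_r14]
    exact toNat_ofBV_ofNat32 mp.count (by omega)


/-- **1054AAH … 1054C2H** (gif_driver.c:119): `rbx = h`, the check of `map->BitsPerPixel` (4 bytes at `map + 4`, inside the live map
object), the load (any value), `digest_int(h, BitsPerPixel)`. `r13`, `r14` are not written. -/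
theorem seg1_bits {Lay : Layout} (hLay : Lay.hi = 0x1000000) {μ : Microarch} (hμ : UserX.MicroOK μ) {u₀ : State}
    (hcode : HasCodeNat Lay u₀ Gif.L.digest_map.entry Gif.Code.code_digest_map.nat Gif.L.digest_map.size)
    (h_int : Calls Lay μ ProgX.Base.WayInv (ProgX.Base.conv u₀) Gif.L.digest_int.entry Gif.Spec.digest_int.spec)
    (h_load4 : Asan.SmallCheck Lay μ ProgX.Base.WayInv (ProgX.Base.CodeOK u₀) [.rax, .rcx, .rdx] 4
      ProgX.Base.L.__asan_load4_noabort.entry)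
    (H : Heap) (rest : List Obj) (frames : List (Nat × FrameLayout)) (mp : Map) (e : State) (ret : Word) (v : State)
    (hmid : seg1_Mid2 Gif.L.digest_map.ret2 H rest frames mp u₀ e ret v) :
    ReachVia Lay μ WayInv v (seg1_Mid2 Gif.L.digest_map.ret4 H rest frames mp u₀ e ret) := by
  obtain ⟨hat, c_r13, h_r14⟩ := hmid
  have he := hat.entry
  v_entry he
  obtain ⟨hp, -, howns⟩ := hat.pre
  have hbase := hp.base
  obtain ⟨hobj1, hobj2, hcol1, hcol2⟩ := howns.map_inside hat.inv.heap hbase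
  have hlo : LiveIn (H.liveObjs ++ rest) frames mp.obj 24 := howns.map_obj_liveIn rest frames
  have w_rip := hat.rip
  have c_rsp : v.reg .rsp = e.reg .rsp - 40 := hat.rsp
  have w_eq : Mem.EqOn ProgX.Base.L.textLo ProgX.Base.L.textHi u₀.mem v.mem := ProgX.Base.conv_code_eqOn hat.code
  have hdf : v.flags .df = false := (show abiInv _ from hat.abi).1
  have hmx : v.mxcsr &&& 0x1F80 = 0x1F80 := (show abiInv _ from hat.abi).2
  have hsse := ProgX.Base.sseOK_of_abiInv hat.abi
  have w_kept : RegsKept [.rsp] v v := RegsKept.refl _ _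
  u_walk hcode [hμ.vendor] until [Gif.L.digest_map.at_105553, Gif.L.digest_map.at_105558]
    span [ProgX.Base.L.textLo, ProgX.Base.L.textHi] side (v_side)
  case check_1054b1 =>
    -- 0x1054b1, gif_driver.c:119: the check of the load `map->BitsPerPixel`: inside the map object `(mp.obj, 24)`
    have hun : ShadowUntouched v.mem s_1054b1.mem := by v_untouched
    exact hlo.accSmall hat.inv.shadow hun _ 4 (by decide) (by u_omega) (by u_omega)
  case call_inv =>
    have x_df : s_1054bd.flags .df = false := by
      rw [w_flags]
      exact w_df_1054b1
    have x_mx : s_1054bd.mxcsr &&& 0x1F80 = 0x1F80 := by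
      rw [w_mxcsr]
      exact hmx
    exact ProgX.Base.abiInv_of x_df x_mx
  case pre_1054bd =>
    trivial
  -- 0x1054c2: digest_int has returned
  v_after_call w_rsp_1054bd w_mem_1054bd
  have hsame : Mem.SameExcept [⟨(e.reg .rsp).toNat - 64, (e.reg .rsp).toNat - 40⟩] v.mem s_1054bdr.mem := by
    u_same
  have hun : ShadowUntouched v.mem s_1054bdr.mem := by v_untouched
  have hat' := hat.carry (cut' := Gif.L.digest_map.ret4) w_rip w_rsp (w_kept.get .r15 rfl) w_code w_inv hun hsame
  refine ReachVia.done ⟨hat', ?_, ?_⟩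
  · rw [w_kept.get .r13 rfl]
    exact c_r13
  · rw [w_kept.get .r14 rfl]
    exact h_r14


/-- **1054C2H … 105553H** (gif_driver.c:120-121): `rbx = h`, the check of `map->SortFlag` (1 byte at `map + 8`, inside the live map
object), the load (any value), `digest_int(h, SortFlag)`, `rbp = h`, `r12d = i = 0`, the jump to the head of the colour loop:
`Head` with the measure `mp.count − 0`. -/
theorem seg1_sort {Lay : Layout} (hLay : Lay.hi = 0x1000000) {μ : Microarch} (hμ : UserX.MicroOK μ) {u₀ : State}
    (hcode : HasCodeNat Lay u₀ Gif.L.digest_map.entry Gif.Code.code_digest_map.nat Gif.L.digest_map.size)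
    (h_int : Calls Lay μ ProgX.Base.WayInv (ProgX.Base.conv u₀) Gif.L.digest_int.entry Gif.Spec.digest_int.spec)
    (h_load1 : Asan.SmallCheck Lay μ ProgX.Base.WayInv (ProgX.Base.CodeOK u₀) [.rax, .rdx] 1
      ProgX.Base.L.__asan_load1_noabort.entry)
    (H : Heap) (rest : List Obj) (frames : List (Nat × FrameLayout)) (mp : Map) (e : State) (ret : Word) (v : State)
    (hmid : seg1_Mid2 Gif.L.digest_map.ret4 H rest frames mp u₀ e ret v) :
    ReachVia Lay μ WayInv v (digest_map.Head mp.count H rest frames (some mp) u₀ e ret) := by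
  obtain ⟨hat, c_r13, h_r14⟩ := hmid
  have he := hat.entry
  v_entry he
  obtain ⟨hp, -, howns⟩ := hat.pre
  have hbase := hp.base
  obtain ⟨hobj1, hobj2, hcol1, hcol2⟩ := howns.map_inside hat.inv.heap hbase
  have hlo : LiveIn (H.liveObjs ++ rest) frames mp.obj 24 := howns.map_obj_liveIn rest frames
  have w_rip := hat.rip
  have c_rsp : v.reg .rsp = e.reg .rsp - 40 := hat.rsp
  have w_eq : Mem.EqOn ProgX.Base.L.textLo ProgX.Base.L.textHi u₀.mem v.mem := ProgX.Base.conv_code_eqOn hat.code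
  have hdf : v.flags .df = false := (show abiInv _ from hat.abi).1
  have hmx : v.mxcsr &&& 0x1F80 = 0x1F80 := (show abiInv _ from hat.abi).2
  have hsse := ProgX.Base.sseOK_of_abiInv hat.abi
  have w_kept : RegsKept [.rsp] v v := RegsKept.refl _ _
  u_walk hcode [hμ.vendor] until [Gif.L.digest_map.at_105553, Gif.L.digest_map.at_105558]
    span [ProgX.Base.L.textLo, ProgX.Base.L.textHi] side (v_side)
  case check_1054c9 =>
    -- 0x1054c9, gif_driver.c:120: the check of the load `map->SortFlag`: inside the map object `(mp.obj, 24)`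
    have hun : ShadowUntouched v.mem s_1054c9.mem := by v_untouched
    exact hlo.accSmall hat.inv.shadow hun _ 1 (by decide) (by u_omega) (by u_omega)
  case call_inv =>
    have x_df : s_1054d6.flags .df = false := by
      rw [w_flags]
      exact w_df_1054c9
    have x_mx : s_1054d6.mxcsr &&& 0x1F80 = 0x1F80 := by
      rw [w_mxcsr]
      exact hmx
    exact ProgX.Base.abiInv_of x_df x_mx
  case pre_1054d6 =>
    trivial
  -- 0x1054db: digest_int has returned
  v_after_call w_rsp_1054d6 w_mem_1054d6
  have hsame : Mem.SameExcept [⟨(e.reg .rsp).toNat - 64, (e.reg .rsp).toNat - 40⟩] v.mem s_1054d6r.mem := by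
    u_same
  have hun : ShadowUntouched v.mem s_1054d6r.mem := by v_untouched
  have hat6 := hat.carry (cut' := Gif.L.digest_map.ret6) w_rip w_rsp (w_kept.get .r15 rfl) w_code w_inv hun hsame
  clear w_same w_post
  u_walk hcode [hμ.vendor] until [Gif.L.digest_map.at_105553, Gif.L.digest_map.at_105558]
    span [ProgX.Base.L.textLo, ProgX.Base.L.textHi] side (v_side)
  -- 0x1054e4 → 0x105553 (gif_driver.c:121, `i = 0`): THE LOOP HEAD, `Head mp.count`; nothing stored since `ret6`
  have hun2 : ShadowUntouched s_1054d6r.mem s_1054e4.mem := by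
    rw [w_mem]
    exact Mem.EqOn.refl _ _ _
  have hsame2 : Mem.SameExcept [⟨(e.reg .rsp).toNat - 64, (e.reg .rsp).toNat - 40⟩] s_1054d6r.mem s_1054e4.mem := by
    rw [w_mem]
    exact Mem.SameExcept.refl _ _
  have habi : (conv u₀).inv s_1054e4 := by
    have x_df : s_1054e4.flags .df = false := by
      rw [w_flags]
      exact w_df
    have x_mx : s_1054e4.mxcsr &&& 0x1F80 = 0x1F80 := by
      rw [w_mxcsr]
      exact w_mx
    exact ProgX.Base.abiInv_of x_df x_mx
  have hr15 : s_1054e4.reg .r15 = s_1054d6r.reg .r15 := by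
    rw [w_kept.get .r15 rfl, hat6.r15, hat.r15]
  have hat' := hat6.carry (cut' := Gif.L.digest_map.at_105553) w_rip w_rsp hr15
    (ProgX.Base.conv_code_in w_eq) habi hun2 hsame2
  have h_r12 : (s_1054e4.reg .r12).toNat = 0 := by
    rw [w_r12]
    exact toNat_ofBV_ofNat32 0 (by omega)
  refine ReachVia.done ⟨hat', mp, rfl, ?_, seg1_map_now hat', ?_, ?_, ?_⟩
  · -- r13 = map: not written
    rw [w_kept.get .r13 rfl, c_r13]
    u_omega
  · -- r14 = ColorCount: not written since the load
    rw [w_kept.get .r14 rfl]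
    exact h_r14
  · -- r12 = 0 ≤ ColorCount
    rw [h_r12]
    exact Nat.zero_le _
  · -- the measure
    rw [h_r12]
    rfl

end Gif.Spec.digest_map_1

/-- Segment 1 of `digest_map`: by cases on the ghost `m` (`none`: the NULL path to the exit; `some mp`: the three checked loads
with their `digest_int`, to the loop head), the lemmas of the namespace chained by `ReachVia.trans`. -/
theorem Gif.Spec.Proved.digest_map_1_ok : Gif.Spec.digest_map_1.Statement := by
  intro Lay hLay μ hμ u₀ hcode h_int h_load4 h_load1 H rest frames m e ret he hpre
  cases m with
  | none =>
    -- gif_driver.c:115-116: `map == NULL`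
    exact Gif.Spec.digest_map_1.seg1_null hLay hμ hcode h_int H rest frames e ret he hpre
  | some mp =>
    -- 0x105480 … 0x105496: the pushes, to the first check
    refine (Gif.Spec.digest_map_1.seg1_pushes hLay hμ hcode H rest frames mp e ret he hpre).trans ?_
    intro v1 h1
    -- 0x105496 … 0x1054aa: `ColorCount`
    refine (Gif.Spec.digest_map_1.seg1_count hLay hμ hcode h_int h_load4 H rest frames mp e ret v1 h1).trans ?_
    intro v2 h2
    -- 0x1054aa … 0x1054c2: `BitsPerPixel`
    refine (Gif.Spec.digest_map_1.seg1_bits hLay hμ hcode h_int h_load4 H rest frames mp e ret v2 h2).trans ?_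
    intro v3 h3
    -- 0x1054c2 … 0x105553: `SortFlag`, to the loop head with the measure `mp.count`
    refine (Gif.Spec.digest_map_1.seg1_sort hLay hμ hcode h_int h_load1 H rest frames mp e ret v3 h3).mono ?_
    intro w hw
    exact Or.inl ⟨mp.count, hw⟩
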